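-- pv_equiv track=rewrite | github.com/Wulfic/Cicada3301 | LiberPrimus/pages/page_00/analysis/word_boundary_analysis.py | optimal_parse
-- ===== SOURCE A (Python) =====
-- def optimal_parse(text, vocab, max_len=10):
--     """Dynamic programming for optimal word coverage"""
--     n = len(text)
--     # dp[i] = (best_score, best_path) ending at position i
--     dp = [None] * (n + 1)
--     dp[0] = (0, [])
--
--     vocab_set = set(vocab)
--
--     for i in range(n):
--         if dp[i] is None:
--             continue
--
--         # Try each possible word length
--         for wlen in range(1, min(max_len + 1, n - i + 1)):
--             word = text[i:i+wlen]
--             if word in vocab_set: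
--                 new_score = dp[i][0] + len(word)  # Score = total matched chars
--                 new_path = dp[i][1] + [word]
--
--                 if dp[i + wlen] is None or new_score > dp[i + wlen][0]:
--                     dp[i + wlen] = (new_score, new_path)
--             elif wlen == 1:
--                 # Allow single unknown chars to continue
--                 new_score = dp[i][0]
--                 new_path = dp[i][1] + ['[' + word + ']']
--
--                 if dp[i + 1] is None or new_score > dp[i + 1][0]:
--                     dp[i + 1] = (new_score, new_path)
--
--     if dp[n]:
--         return dp[n][1], dp[n][0]
--     return [], 0
-- ===== SOURCE B (Python) =====
-- def optimal_parse(text, vocab, max_len=10):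
--     """DP with back-pointers; reconstruct the path once at the end instead of storing paths."""
--     n = len(text)
--     vocab_set = set(vocab)
--     score = [None] * (n + 1)
--     back = [None] * (n + 1)  # back[j] = (prev_index, token emitted to reach j)
--     score[0] = 0
--     for i in range(n):
--         if score[i] is None:
--             continue
--         for wlen in range(1, min(max_len + 1, n - i + 1)):
--             word = text[i:i+wlen]
--             if word in vocab_set:
--                 s = score[i] + len(word)
--                 j = i + wlen
--                 if score[j] is None or s > score[j]:
--                     score[j] = s
--                     back[j] = (i, word)
--             elif wlen == 1:
--                 if score[i+1] is None or score[i] > score[i+1]: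
--                     score[i+1] = score[i]
--                     back[i+1] = (i, '[' + word + ']')
--     if score[n] is None:
--         return [], 0
--     path = []
--     j = n
--     while j > 0:
--         i, tok = back[j]
--         path.append(tok)
--         j = i
--     path.reverse()
--     return path, score[n]
-- ===== Notes on version B (the rewrite author's own statement) =====
-- stated objective: alternative
-- what changed: B replaces A's DP that stores and copies a full path list at every cell update with a DP over scores plus back-pointers (predecessor index, token), reconstructing the winning path once at the end.
import Mathlib
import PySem

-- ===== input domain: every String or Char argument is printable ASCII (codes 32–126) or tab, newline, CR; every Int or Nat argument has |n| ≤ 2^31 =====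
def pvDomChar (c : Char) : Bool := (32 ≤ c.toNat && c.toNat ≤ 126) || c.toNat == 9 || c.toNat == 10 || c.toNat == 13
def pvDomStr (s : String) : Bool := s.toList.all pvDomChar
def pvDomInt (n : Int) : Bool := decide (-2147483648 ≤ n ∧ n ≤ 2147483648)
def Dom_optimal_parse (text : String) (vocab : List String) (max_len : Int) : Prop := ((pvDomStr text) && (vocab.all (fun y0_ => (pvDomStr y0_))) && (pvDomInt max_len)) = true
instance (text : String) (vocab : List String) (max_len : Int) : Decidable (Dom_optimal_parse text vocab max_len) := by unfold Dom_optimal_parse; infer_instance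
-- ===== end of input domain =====

-- B replaces A's path-copying DP with a score + back-pointer DP and one final path reconstruction (alternative algorithm, same observed cost).

-- ===== PORT A =====
-- inner 'for wlen in range(...)' body of A
def pvAInner (text : String) (vs : PySem.Set String) (i : Int)
    (dp : List (Option (Int × List String))) (wlen : Int) :
    List (Option (Int × List String)) :=
  let word := PySem.Str.slice text (some i) (some (i + wlen))
  if PySem.Set.contains vs word then
    let cur := (PySem.List.pyGetD dp i none).getD (0, [])
    let new_score := cur.1 + PySem.Str.len word
    let new_path := cur.2 ++ [word]
    match PySem.List.pyGetD dp (i + wlen) none with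
    | none => PySem.List.pySetD dp (i + wlen) (some (new_score, new_path))
    | some old =>
      if new_score > old.1 then PySem.List.pySetD dp (i + wlen) (some (new_score, new_path)) else dp
  else if wlen = 1 then
    let cur := (PySem.List.pyGetD dp i none).getD (0, [])
    let new_score := cur.1
    let new_path := cur.2 ++ [PySem.Str.join "" ["[", word, "]"]]
    match PySem.List.pyGetD dp (i + 1) none with
    | none => PySem.List.pySetD dp (i + 1) (some (new_score, new_path))
    | some old =>
      if new_score > old.1 then PySem.List.pySetD dp (i + 1) (some (new_score, new_path)) else dp
  else dp

-- outer 'for i in range(n)' body of A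
def pvAOuter (text : String) (vs : PySem.Set String) (n max_len : Int)
    (dp : List (Option (Int × List String))) (i : Int) :
    List (Option (Int × List String)) :=
  match PySem.List.pyGetD dp i none with
  | none => dp
  | some _ =>
    (PySem.List.pyRange 1 (min (max_len + 1) (n - i + 1)) 1).foldl (pvAInner text vs i) dp

def optimal_parse (text : String) (vocab : List String) (max_len : Int) : List String × Int :=
  let n := PySem.Str.len text
  let dp0 := PySem.List.pySetD
    (List.replicate (n.toNat + 1) (none : Option (Int × List String))) 0 (some (0, []))
  let vs := PySem.Set.ofList vocab
  let dp := (PySem.List.pyRange 0 n 1).foldl (pvAOuter text vs n max_len) dp0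
  match PySem.List.pyGetD dp n none with
  | some v => (v.2, v.1)
  | none => ([], 0)

-- ===== PORT B =====
-- inner 'for wlen in range(...)' body of B (state: score array × back-pointer array)
def pvBInner (text : String) (vs : PySem.Set String) (i : Int)
    (sb : List (Option Int) × List (Option (Int × String))) (wlen : Int) :
    List (Option Int) × List (Option (Int × String)) :=
  let score := sb.1
  let back := sb.2
  let word := PySem.Str.slice text (some i) (some (i + wlen))
  if PySem.Set.contains vs word then
    let s := (PySem.List.pyGetD score i none).getD 0 + PySem.Str.len word
    let j := i + wlen
    match PySem.List.pyGetD score j none with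
    | none => (PySem.List.pySetD score j (some s), PySem.List.pySetD back j (some (i, word)))
    | some old =>
      if s > old then (PySem.List.pySetD score j (some s), PySem.List.pySetD back j (some (i, word)))
      else (score, back)
  else if wlen = 1 then
    let s := (PySem.List.pyGetD score i none).getD 0
    let tok := PySem.Str.join "" ["[", word, "]"]
    match PySem.List.pyGetD score (i + 1) none with
    | none => (PySem.List.pySetD score (i + 1) (some s), PySem.List.pySetD back (i + 1) (some (i, tok)))
    | some old =>
      if s > old then (PySem.List.pySetD score (i + 1) (some s), PySem.List.pySetD back (i + 1) (some (i, tok)))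
      else (score, back)
  else (score, back)

-- outer 'for i in range(n)' body of B
def pvBOuter (text : String) (vs : PySem.Set String) (n max_len : Int)
    (sb : List (Option Int) × List (Option (Int × String))) (i : Int) :
    List (Option Int) × List (Option (Int × String)) :=
  match PySem.List.pyGetD sb.1 i none with
  | none => sb
  | some _ =>
    (PySem.List.pyRange 1 (min (max_len + 1) (n - i + 1)) 1).foldl (pvBInner text vs i) sb

-- the 'while j > 0' back-pointer walk of B (fuel = n+1 bounds the strictly decreasing j)
def pvWalk (back : List (Option (Int × String))) (fuel : Nat) (j : Int) (path : List String) :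
    List String :=
  match fuel with
  | 0 => path
  | fuel + 1 =>
    if 0 < j then
      match PySem.List.pyGetD back j none with
      | some pr => pvWalk back fuel pr.1 (path ++ [pr.2])
      | none => path
    else path

def optimal_parse_alt (text : String) (vocab : List String) (max_len : Int) : List String × Int :=
  let n := PySem.Str.len text
  let vs := PySem.Set.ofList vocab
  let score0 := PySem.List.pySetD (List.replicate (n.toNat + 1) (none : Option Int)) 0 (some 0)
  let back0 : List (Option (Int × String)) := List.replicate (n.toNat + 1) none
  let sb := (PySem.List.pyRange 0 n 1).foldl (pvBOuter text vs n max_len) (score0, back0)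
  match PySem.List.pyGetD sb.1 n none with
  | none => ([], 0)
  | some s => ((pvWalk sb.2 (n.toNat + 1) n []).reverse, s)

-- ===== PRECONDITION & SPEC =====
def Spec_optimal_parse (text : String) (vocab : List String) (max_len : Int) (out : List String × Int) : Prop := out = optimal_parse_alt text vocab max_len
instance (text : String) (vocab : List String) (max_len : Int) (out : List String × Int) : Decidable (Spec_optimal_parse text vocab max_len out) := by unfold Spec_optimal_parse; infer_instance

-- ===== CLAIM (what is proved, stated in full; the proofs are below) =====
def Claim_equal_optimal_parse : Prop := ∀ (text : String) (vocab : List String) (max_len : Int), Dom_optimal_parse text vocab max_len → Spec_optimal_parse text vocab max_len (optimal_parse text vocab max_len)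

-- ===== LEMMAS AND PROOFS =====

def pvRel (I : Int) (dp : List (Option (Int × List String)))
    (score : List (Option Int)) (back : List (Option (Int × String))) : Prop :=
  score = dp.map (Option.map Prod.fst) ∧
  back.length = dp.length ∧
  (∀ (j : Nat) pr, back[j]? = some (some pr) → 0 ≤ pr.1 ∧ pr.1 < (j : Int) ∧ pr.1 ≤ I) ∧
  (∀ (j : Nat), dp[j]? = some none → back[j]? = some none) ∧
  (∀ (j : Nat) (s : Int) (p : List String), dp[j]? = some (some (s, p)) →
    ∀ fuel : Nat, j ≤ fuel → pvWalk back fuel (j : Int) [] = p.reverse)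

theorem pvRel_mono {I I' : Int} {dp : List (Option (Int × List String))}
    {score : List (Option Int)} {back : List (Option (Int × String))}
    (h : pvRel I dp score back) (hII : I ≤ I') : pvRel I' dp score back := by
  obtain ⟨ha, hb, hc, hd, he⟩ := h
  exact ⟨ha, hb, fun j pr hj =>
    ⟨(hc j pr hj).1, (hc j pr hj).2.1, le_trans (hc j pr hj).2.2 hII⟩, hd, he⟩

theorem pvGetD_nonneg {α : Type} (xs : List α) (i : Int) (h : 0 ≤ i) (d : α) :
    PySem.List.pyGetD xs i d = (xs[i.toNat]?).getD d := by
  have hi : i = ((i.toNat : Nat) : Int) := by omega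
  conv_lhs => rw [hi, PySem.List.pyGetD_natCast]
  rw [List.getD_eq_getElem?_getD]

theorem pvWalk_append (back : List (Option (Int × String))) (fuel : Nat) :
    ∀ (j : Int) (path : List String), pvWalk back fuel j path = path ++ pvWalk back fuel j [] := by
  induction fuel with
  | zero => intro j path; simp [pvWalk]
  | succ f ih =>
    intro j path
    simp only [pvWalk]
    by_cases hj : 0 < j
    · simp only [if_pos hj]
      cases hpr : PySem.List.pyGetD back j none with
      | none => simp
      | some pr =>
        show pvWalk back f pr.1 (path ++ [pr.2]) = path ++ pvWalk back f pr.1 ([] ++ [pr.2])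
        rw [ih pr.1 (path ++ [pr.2]), ih pr.1 ([] ++ [pr.2])]; simp
    · simp [hj]

theorem pvWalk_zero (back : List (Option (Int × String))) (fuel : Nat) (j : Int) (hj : j ≤ 0) :
    pvWalk back fuel j [] = [] := by
  have h0 : ¬ (0 < j) := by omega
  cases fuel <;> simp [pvWalk, h0]

theorem pvWalk_set_ne (back : List (Option (Int × String))) (I : Int)
    (hb : ∀ (k : Nat) pr, back[k]? = some (some pr) → 0 ≤ pr.1 ∧ pr.1 < (k : Int) ∧ pr.1 ≤ I)
    (m : Nat) (hIm : I < (m : Int)) (v : Option (Int × String)) :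
    ∀ (fuel : Nat) (j : Int), j ≠ (m : Int) →
      pvWalk (back.set m v) fuel j [] = pvWalk back fuel j [] := by
  intro fuel
  induction fuel with
  | zero => intro j _; rfl
  | succ f ih =>
    intro j hjm
    by_cases hj : 0 < j
    · have hne : m ≠ j.toNat := by omega
      have hget : PySem.List.pyGetD (back.set m v) j none = PySem.List.pyGetD back j none := by
        rw [pvGetD_nonneg _ _ (le_of_lt hj), pvGetD_nonneg _ _ (le_of_lt hj),
          List.getElem?_set_ne hne]
      simp only [pvWalk, if_pos hj, hget]
      cases hpr : PySem.List.pyGetD back j none with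
      | none => rfl
      | some pr =>
        have hel : back[j.toNat]? = some (some pr) := by
          rw [pvGetD_nonneg _ _ (le_of_lt hj)] at hpr
          cases hx : back[j.toNat]? with
          | none => rw [hx] at hpr; simp at hpr
          | some o => rw [hx] at hpr; simp at hpr; rw [hpr]
        have hb' := hb j.toNat pr hel
        have hlt : pr.1 ≠ (m : Int) := by omega
        show pvWalk (back.set m v) f pr.1 ([] ++ [pr.2]) = pvWalk back f pr.1 ([] ++ [pr.2])
        rw [pvWalk_append _ f pr.1 ([] ++ [pr.2]), pvWalk_append back f pr.1 ([] ++ [pr.2]),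
          ih pr.1 hlt]
    · simp [pvWalk, hj]

theorem pvUpdate (i j' : Int) (dp : List (Option (Int × List String)))
    (score : List (Option Int)) (back : List (Option (Int × String))) (s' : Int) (tok : String)
    (hrel : pvRel i dp score back) (h0 : 0 ≤ i) (hij : i < j') (hjlen : j'.toNat < dp.length) :
    pvRel i (PySem.List.pySetD dp j' (some (s', ((PySem.List.pyGetD dp i none).getD (0, [])).2 ++ [tok])))
            (PySem.List.pySetD score j' (some s'))
            (PySem.List.pySetD back j' (some (i, tok))) := by
  obtain ⟨ha, hbl, hc, hd, he⟩ := hrel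
  have h0j : (0:Int) ≤ j' := by omega
  have hjc : ((j'.toNat : Nat) : Int) = j' := by omega
  have hic : ((i.toNat : Nat) : Int) = i := by omega
  have hilt : i.toNat < j'.toNat := by omega
  have hblen : j'.toNat < back.length := by omega
  rw [PySem.List.pySetD_of_nonneg _ _ h0j, PySem.List.pySetD_of_nonneg _ _ h0j,
    PySem.List.pySetD_of_nonneg _ _ h0j]
  -- the walk from i reproduces (the reverse of) the current path at i
  have hwalki : ∀ fuel : Nat, i.toNat ≤ fuel →
      pvWalk back fuel i [] = ((PySem.List.pyGetD dp i none).getD (0, [])).2.reverse := by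
    intro fuel hfu
    rw [pvGetD_nonneg _ _ h0]
    have hiin : i.toNat < dp.length := by omega
    rw [List.getElem?_eq_getElem hiin]
    cases helem : dp[i.toNat] with
    | none =>
      simp only [Option.getD_some]
      by_cases hi0 : 0 < i
      · have hbacki := hd i.toNat (by rw [List.getElem?_eq_getElem hiin, helem])
        cases fuel with
        | zero => simp [pvWalk]
        | succ f =>
          simp only [pvWalk, if_pos hi0]
          rw [pvGetD_nonneg _ _ h0, hbacki]
          simp
      · rw [pvWalk_zero back fuel i (by omega)]; simp
    | some v =>
      obtain ⟨s0, p0⟩ := v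
      have := he i.toNat s0 p0 (by rw [List.getElem?_eq_getElem hiin, helem]) fuel hfu
      rw [hic] at this
      rw [this]; simp
  refine ⟨?_, ?_, ?_, ?_, ?_⟩
  · rw [ha, List.map_set]; rfl
  · simp [hbl]
  · intro j pr hj
    rcases eq_or_ne j j'.toNat with rfl | hne
    · rw [List.getElem?_set_self hblen] at hj
      injection hj with hj; injection hj with hj
      subst hj
      exact ⟨h0, by omega, le_refl i⟩
    · rw [List.getElem?_set_ne (by omega)] at hj
      exact hc j pr hj
  · intro j hj
    rcases eq_or_ne j j'.toNat with rfl | hne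
    · rw [List.getElem?_set_self hjlen] at hj; simp at hj
    · rw [List.getElem?_set_ne (by omega)] at hj
      rw [List.getElem?_set_ne (by omega)]
      exact hd j hj
  · intro j s p hj fuel hfu
    rcases eq_or_ne j j'.toNat with rfl | hne
    · rw [List.getElem?_set_self hjlen] at hj
      injection hj with hj; injection hj with hj
      injection hj with hs hp
      subst hs; subst hp
      cases fuel with
      | zero => omega
      | succ f =>
        have hf : i.toNat ≤ f := by omega
        simp only [pvWalk, if_pos (by omega : (0:Int) < (j'.toNat : Int))]
        rw [pvGetD_nonneg _ _ (by omega : (0:Int) ≤ (j'.toNat : Int))]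
        have : ((j'.toNat : Int)).toNat = j'.toNat := by omega
        rw [this, List.getElem?_set_self hblen]
        simp only [Option.getD_some]
        show pvWalk (back.set j'.toNat (some (i, tok))) f i ([] ++ [tok]) = _
        rw [pvWalk_append _ f i ([] ++ [tok]),
          pvWalk_set_ne back i hc j'.toNat (by omega) _ f i (by omega),
          hwalki f hf]
        simp
    · rw [List.getElem?_set_ne (by omega)] at hj
      have hbase := he j s p hj fuel hfu
      rw [← hbase]
      by_cases hj0 : 0 < (j : Int)
      · cases fuel with
        | zero => rfl
        | succ f =>
          simp only [pvWalk, if_pos hj0]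
          have hjj : (j:Int).toNat = j := by omega
          rw [pvGetD_nonneg _ _ (by omega), pvGetD_nonneg _ _ (by omega), hjj,
            List.getElem?_set_ne (by omega : j'.toNat ≠ j)]
          cases hx : back[j]? with
          | none => simp
          | some o =>
            cases o with
            | none => simp
            | some pr =>
              simp only [Option.getD_some]
              have hcc := hc j pr hx
              show pvWalk (back.set j'.toNat (some (i, tok))) f pr.1 ([] ++ [pr.2]) =
                pvWalk back f pr.1 ([] ++ [pr.2])
              rw [pvWalk_append _ f pr.1 ([] ++ [pr.2]), pvWalk_append back f pr.1 ([] ++ [pr.2]),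
                pvWalk_set_ne back i hc j'.toNat (by omega) _ f pr.1 (by omega)]
      · rw [pvWalk_zero _ fuel _ (by omega), pvWalk_zero _ fuel _ (by omega)]

theorem pvStep (text : String) (vs : PySem.Set String) (n i wlen : Int)
    (dp : List (Option (Int × List String))) (score : List (Option Int))
    (back : List (Option (Int × String)))
    (hrel : pvRel i dp score back) (hlen : dp.length = n.toNat + 1)
    (hi0 : 0 ≤ i) (_hin : i < n) (hw1 : 1 ≤ wlen) (hwn : wlen ≤ n - i) :
    pvRel i (pvAInner text vs i dp wlen) (pvBInner text vs i (score, back) wlen).1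
      (pvBInner text vs i (score, back) wlen).2 ∧
    (pvAInner text vs i dp wlen).length = dp.length := by
  have hscore : ∀ k : Int, PySem.List.pyGetD score k none
      = Option.map Prod.fst (PySem.List.pyGetD dp k none) := by
    intro k
    rw [hrel.1]
    have := PySem.List.pyGetD_map (Option.map Prod.fst) dp k none
    simpa using this
  have hgd : ∀ k : Int, (PySem.List.pyGetD score k none).getD 0
      = ((PySem.List.pyGetD dp k none).getD (0, [])).1 := by
    intro k; rw [hscore k]; cases PySem.List.pyGetD dp k none <;> rfl
  have hjlen : (i + wlen).toNat < dp.length := by omega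
  have hjlen1 : (i + 1).toNat < dp.length := by omega
  have hlset : ∀ (v : Option (Int × List String)) (k : Int), 0 ≤ k →
      (PySem.List.pySetD dp k v).length = dp.length := by
    intro v k hk; rw [PySem.List.pySetD_of_nonneg _ _ hk]; simp
  simp only [pvAInner, pvBInner]
  by_cases hv : PySem.Set.contains vs (PySem.Str.slice text (some i) (some (i + wlen)))
  · simp only [if_pos hv]
    rw [hscore (i + wlen), hgd i]
    cases hD : PySem.List.pyGetD dp (i + wlen) none with
    | none =>
      exact ⟨pvUpdate i (i + wlen) dp score back _ _ hrel hi0 (by omega) hjlen,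
        hlset _ _ (by omega)⟩
    | some old =>
      simp only [Option.map_some]
      by_cases hcmp : ((PySem.List.pyGetD dp i none).getD (0, [])).1
          + PySem.Str.len (PySem.Str.slice text (some i) (some (i + wlen))) > old.1
      · simp only [if_pos hcmp]
        exact ⟨pvUpdate i (i + wlen) dp score back _ _ hrel hi0 (by omega) hjlen,
          hlset _ _ (by omega)⟩
      · simp only [if_neg hcmp]
        exact ⟨hrel, trivial⟩
  · simp only [if_neg hv]
    by_cases hw : wlen = 1
    · simp only [if_pos hw]
      rw [hscore (i + 1), hgd i]
      cases hD : PySem.List.pyGetD dp (i + 1) none with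
      | none =>
        exact ⟨pvUpdate i (i + 1) dp score back _ _ hrel hi0 (by omega) hjlen1,
          hlset _ _ (by omega)⟩
      | some old =>
        simp only [Option.map_some]
        by_cases hcmp : ((PySem.List.pyGetD dp i none).getD (0, [])).1 > old.1
        · simp only [if_pos hcmp]
          exact ⟨pvUpdate i (i + 1) dp score back _ _ hrel hi0 (by omega) hjlen1,
            hlset _ _ (by omega)⟩
        · simp only [if_neg hcmp]
          exact ⟨hrel, trivial⟩
    · simp only [if_neg hw]
      exact ⟨hrel, trivial⟩

theorem pvInnerFold (text : String) (vs : PySem.Set String) (n i : Int) :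
    ∀ (l : List Int), (∀ w ∈ l, 1 ≤ w ∧ w ≤ n - i) →
    ∀ (dp : List (Option (Int × List String))) (score : List (Option Int))
      (back : List (Option (Int × String))),
      pvRel i dp score back → dp.length = n.toNat + 1 → 0 ≤ i → i < n →
      pvRel i (l.foldl (pvAInner text vs i) dp) (l.foldl (pvBInner text vs i) (score, back)).1
        (l.foldl (pvBInner text vs i) (score, back)).2 ∧
      (l.foldl (pvAInner text vs i) dp).length = dp.length := by
  intro l
  induction l with
  | nil => intro _ dp score back hrel _ _ _; exact ⟨hrel, rfl⟩
  | cons w t ih =>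
    intro hl dp score back hrel hlen h0 hin
    have hw := hl w (List.mem_cons_self ..)
    obtain ⟨hstep, hsteplen⟩ := pvStep text vs n i w dp score back hrel hlen h0 hin hw.1 hw.2
    simp only [List.foldl_cons]
    have hrec := ih (fun x hx => hl x (List.mem_cons_of_mem _ hx)) (pvAInner text vs i dp w)
      (pvBInner text vs i (score, back) w).1 (pvBInner text vs i (score, back) w).2
      hstep (by omega) h0 hin
    simp only [Prod.mk.eta] at hrec
    exact ⟨hrec.1, by rw [hrec.2, hsteplen]⟩

theorem pvOuterFold (text : String) (vs : PySem.Set String) (n max_len : Int) :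
    ∀ (l : List Int), (∀ x ∈ l, 0 ≤ x ∧ x < n) → l.Pairwise (· < ·) →
    ∀ (I : Int) (dp : List (Option (Int × List String))) (score : List (Option Int))
      (back : List (Option (Int × String))),
      (∀ x ∈ l, I ≤ x) → pvRel I dp score back → dp.length = n.toNat + 1 →
      ∃ J, pvRel J (l.foldl (pvAOuter text vs n max_len) dp)
        (l.foldl (pvBOuter text vs n max_len) (score, back)).1
        (l.foldl (pvBOuter text vs n max_len) (score, back)).2 ∧
        (l.foldl (pvAOuter text vs n max_len) dp).length = dp.length := by
  intro l
  induction l with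
  | nil => intro _ _ I dp score back _ hrel _; exact ⟨I, hrel, rfl⟩
  | cons i t ih =>
    intro hl hsort I dp score back hI hrel hlen
    have hib := hl i (List.mem_cons_self ..)
    have hrel' : pvRel i dp score back := pvRel_mono hrel (hI i (List.mem_cons_self ..))
    have hpc := List.pairwise_cons.mp hsort
    have htail : ∀ x ∈ t, i ≤ x := fun x hx => le_of_lt (hpc.1 x hx)
    have hscore : PySem.List.pyGetD score i none
        = Option.map Prod.fst (PySem.List.pyGetD dp i none) := by
      rw [hrel.1]
      have := PySem.List.pyGetD_map (Option.map Prod.fst) dp i none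
      simpa using this
    simp only [List.foldl_cons, pvAOuter, pvBOuter]
    cases hD : PySem.List.pyGetD dp i none with
    | none =>
      simp only [hscore, hD, Option.map_none]
      exact ih (fun x hx => hl x (List.mem_cons_of_mem _ hx)) hpc.2 i dp score back
        htail hrel' hlen
    | some v =>
      simp only [hscore, hD, Option.map_some]
      have helems : ∀ w ∈ PySem.List.pyRange 1 (min (max_len + 1) (n - i + 1)) 1,
          1 ≤ w ∧ w ≤ n - i := by
        intro w hw
        have := PySem.List.mem_pyRange_one.mp hw
        constructor
        · omega
        · have : w < min (max_len + 1) (n - i + 1) := this.2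
          omega
      obtain ⟨hfold, hfoldlen⟩ := pvInnerFold text vs n i _ helems dp score back hrel' hlen
        hib.1 hib.2
      have hrec := ih (fun x hx => hl x (List.mem_cons_of_mem _ hx)) hpc.2 i
        ((PySem.List.pyRange 1 (min (max_len + 1) (n - i + 1)) 1).foldl
          (pvAInner text vs i) dp)
        ((PySem.List.pyRange 1 (min (max_len + 1) (n - i + 1)) 1).foldl
          (pvBInner text vs i) (score, back)).1
        ((PySem.List.pyRange 1 (min (max_len + 1) (n - i + 1)) 1).foldl
          (pvBInner text vs i) (score, back)).2
        htail hfold (by rw [hfoldlen]; exact hlen)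
      simp only [Prod.mk.eta] at hrec
      obtain ⟨J, hJ, hL⟩ := hrec
      exact ⟨J, hJ, by rw [hL, hfoldlen]⟩

theorem pvMain (text : String) (vocab : List String) (max_len : Int) :
    optimal_parse text vocab max_len = optimal_parse_alt text vocab max_len := by
  simp only [optimal_parse, optimal_parse_alt]
  have hn0 : (0 : Int) ≤ PySem.Str.len text := by
    rw [PySem.Str.len_eq]; exact Int.natCast_nonneg _
  set n := PySem.Str.len text with hn
  set vs := PySem.Set.ofList vocab with hvs
  have hdp0 : PySem.List.pySetD
      (List.replicate (n.toNat + 1) (none : Option (Int × List String))) 0 (some (0, []))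
      = some (0, ([] : List String)) :: List.replicate n.toNat none := by
    rw [PySem.List.pySetD_of_nonneg _ _ (by omega : (0:Int) ≤ 0)]
    simp [List.replicate_succ]
  have hsc0 : PySem.List.pySetD (List.replicate (n.toNat + 1) (none : Option Int)) 0 (some 0)
      = some (0 : Int) :: List.replicate n.toNat none := by
    rw [PySem.List.pySetD_of_nonneg _ _ (by omega : (0:Int) ≤ 0)]
    simp [List.replicate_succ]
  rw [hdp0, hsc0]
  have hrel0 : pvRel 0 (some (0, ([] : List String)) :: List.replicate n.toNat none)
      (some (0 : Int) :: List.replicate n.toNat none)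
      (List.replicate (n.toNat + 1) (none : Option (Int × String))) := by
    refine ⟨?_, ?_, ?_, ?_, ?_⟩
    · simp [List.map_replicate]
    · simp
    · intro j pr hj
      rw [List.getElem?_replicate] at hj
      by_cases h : j < n.toNat + 1
      · simp [h] at hj
      · simp [h] at hj
    · intro j hj
      have hlt : j < n.toNat + 1 := by
        obtain ⟨h1, -⟩ := List.getElem?_eq_some_iff.mp hj
        simpa using h1
      rw [List.getElem?_replicate]
      simp [hlt]
    · intro j s p hj fuel _
      cases j with
      | zero =>
        simp only [List.getElem?_cons_zero, Option.some.injEq, Prod.mk.injEq] at hj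
        obtain ⟨hs, hp⟩ := hj
        subst hs; subst hp
        rw [pvWalk_zero _ _ _ (by omega)]; simp
      | succ k =>
        simp only [List.getElem?_cons_succ] at hj
        rw [List.getElem?_replicate] at hj
        by_cases h : k < n.toNat
        · simp [h] at hj
        · simp [h] at hj
  have hmem : ∀ x ∈ PySem.List.pyRange 0 n 1, 0 ≤ x ∧ x < n := by
    intro x hx; exact PySem.List.mem_pyRange_one.mp hx
  obtain ⟨J, relF, lenF⟩ := pvOuterFold text vs n max_len (PySem.List.pyRange 0 n 1) hmem
    (PySem.List.pairwise_lt_pyRange_one 0 n) 0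
    (some (0, ([] : List String)) :: List.replicate n.toNat none)
    (some (0 : Int) :: List.replicate n.toNat none)
    (List.replicate (n.toNat + 1) (none : Option (Int × String)))
    (fun x hx => (hmem x hx).1) hrel0 (by simp)
  set dpF := (PySem.List.pyRange 0 n 1).foldl (pvAOuter text vs n max_len)
    (some (0, ([] : List String)) :: List.replicate n.toNat none) with hdpF
  set sbF := (PySem.List.pyRange 0 n 1).foldl (pvBOuter text vs n max_len)
    ((some (0 : Int) :: List.replicate n.toNat none),
     (List.replicate (n.toNat + 1) (none : Option (Int × String)))) with hsbF
  have hscoreF : PySem.List.pyGetD sbF.1 n none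
      = Option.map Prod.fst (PySem.List.pyGetD dpF n none) := by
    rw [relF.1]
    have := PySem.List.pyGetD_map (Option.map Prod.fst) dpF n none
    simpa using this
  cases hD : PySem.List.pyGetD dpF n none with
  | none => rw [hscoreF, hD]; rfl
  | some v =>
    obtain ⟨s, p⟩ := v
    rw [hscoreF, hD]
    simp only [Option.map_some]
    have helem : dpF[n.toNat]? = some (some (s, p)) := by
      rw [pvGetD_nonneg _ _ hn0] at hD
      cases hx : dpF[n.toNat]? with
      | none => rw [hx] at hD; simp at hD
      | some o => rw [hx] at hD; simp at hD; rw [hD]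
    have hw := relF.2.2.2.2 n.toNat s p helem (n.toNat + 1) (by omega)
    have hcast : ((n.toNat : Nat) : Int) = n := by omega
    rw [hcast] at hw
    rw [hw]
    simp

-- ===== VERDICT (by name: the statement is the Claim_ definition above) =====
theorem optimal_parse_spec : Claim_equal_optimal_parse := by
  intro text vocab max_len _
  unfold Spec_optimal_parse
  exact pvMain text vocab max_len
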